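-- pv_equiv track=rewrite | github.com/stebach/AdventOfCode | years/2020/day21/solve_2020_21.py | find_harmless_ingredients
-- ===== SOURCE A (Python) =====
-- def find_harmless_ingredients(data):
--     alergens = get_alergens(data)
--
--     alergen_list = sum([alergens[x] for x in alergens], [])
--     harmless = []
--     for food in data:
--         for ingredient in food[0]:
--             if ingredient not in alergen_list:
--                 harmless.append(ingredient)
--     return harmless
--
-- def get_alergens(data):
--     alergens = {}
--     for food in data:
--         for alergen in food[1]:
--             if alergen not in alergens:
--                 alergens[alergen] = list(food[0])
--             else:
--                 alergens[alergen] = list(set(alergens[alergen]).intersection(list(food[0])))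
--     return alergens
-- ===== SOURCE B (Python) =====
-- def find_harmless_ingredients(data):
--     # Counting-table approach: an ingredient is an allergen candidate iff it
--     # occurs in every food that lists that allergen.
--     foods_with = {}
--     cooccur = {}
--     for food in data:
--         ings = set(food[0])
--         for a in set(food[1]):
--             foods_with[a] = foods_with.get(a, 0) + 1
--             for i in ings:
--                 cooccur[(a, i)] = cooccur.get((a, i), 0) + 1
--     candidates = set()
--     for (a, i), c in cooccur.items():
--         if c == foods_with[a]:
--             candidates.add(i)
--     return [i for food in data for i in food[0] if i not in candidates]
-- ===== Notes on version B (the rewrite author's own statement) =====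
-- stated objective: faster
-- what changed: Replaces get_alergens's per-allergen incremental set intersections with a single counting pass (foods-per-allergen and (allergen, ingredient) co-occurrence tables): an ingredient is an allergen candidate iff its co-occurrence count equals the allergen's food count; the final sweep tests membership in a candidate set instead of scanning A's concatenated candidate list.
import Mathlib
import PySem

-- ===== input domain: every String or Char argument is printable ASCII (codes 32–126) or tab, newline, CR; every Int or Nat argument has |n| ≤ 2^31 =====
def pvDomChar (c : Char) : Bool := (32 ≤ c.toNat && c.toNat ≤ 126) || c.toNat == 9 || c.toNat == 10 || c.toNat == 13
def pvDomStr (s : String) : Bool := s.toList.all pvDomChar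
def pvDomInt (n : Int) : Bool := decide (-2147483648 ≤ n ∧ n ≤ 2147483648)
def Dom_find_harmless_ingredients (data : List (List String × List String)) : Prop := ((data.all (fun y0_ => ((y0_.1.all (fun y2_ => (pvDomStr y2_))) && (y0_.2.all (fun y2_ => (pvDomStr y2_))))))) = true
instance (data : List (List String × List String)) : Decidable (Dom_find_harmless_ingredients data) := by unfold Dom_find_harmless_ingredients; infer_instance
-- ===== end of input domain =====

-- B replaces A's per-allergen incremental set intersection with a counting table
-- (co-occurrence counts per (allergen, ingredient) pair) and a candidate set membership
-- test; objective: faster (measured).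

-- ===== PORT A =====
-- list(set(prev).intersection(food[0])) is ported as PySem.Set.inter (Set.ofList prev) food.1:
-- exact as a SET (Python's set iteration order is not modelled; the list is only ever used
-- for membership tests, so the result of find_harmless_ingredients does not depend on it).
def get_alergens (data : List (List String × List String)) : PySem.Dict String (List String) :=
  data.foldl (fun d food =>
    food.2.foldl (fun d a =>
      match d.get? a with
      | none => d.insert a food.1
      | some prev => d.insert a (PySem.Set.inter (PySem.Set.ofList prev) food.1)) d)
    PySem.Dict.empty

def find_harmless_ingredients (data : List (List String × List String)) : List String :=
  let alergens := get_alergens data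
  -- sum([alergens[x] for x in alergens], []): alergens[x] always hits a key, so getD a [] is it
  let alergen_list := (alergens.keys.map (fun a => alergens.getD a [])).foldl (· ++ ·) []
  data.foldl (fun harmless food =>
    food.1.foldl (fun harmless i =>
      if !(alergen_list.contains i) then harmless ++ [i] else harmless) harmless) []

-- ===== PORT B =====
-- counting pass of Source B: one fold over the foods carrying the pair of dicts (foods_with, cooccur)
def fhiCounts (data : List (List String × List String)) :
    PySem.Dict String Int × PySem.Dict (String × String) Int :=
  data.foldl (fun st food =>
    (PySem.Set.ofList food.2).foldl (fun st a =>
      (st.1.modify a 0 (· + 1),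
       (PySem.Set.ofList food.1).foldl (fun co i => co.modify (a, i) 0 (· + 1)) st.2)) st)
    (PySem.Dict.empty, PySem.Dict.empty)

def find_harmless_ingredients_alt (data : List (List String × List String)) : List String :=
  let st := fhiCounts data
  -- foods_with[a] never raises (a key of cooccur is always a key of foods_with): getD a 0 is exact
  let candidates := st.2.items.foldl (fun s p =>
    if p.2 == st.1.getD p.1.1 0 then PySem.Set.add s p.1.2 else s) PySem.Set.empty
  data.flatMap (fun food => food.1.filter (fun i => !(candidates.contains i)))

-- ===== PRECONDITION & SPEC =====
def Spec_find_harmless_ingredients (data : List (List String × List String)) (out : List String) : Prop := out = find_harmless_ingredients_alt data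
instance (data : List (List String × List String)) (out : List String) : Decidable (Spec_find_harmless_ingredients data out) := by unfold Spec_find_harmless_ingredients; infer_instance

-- ===== CLAIM (what is proved, stated in full; the proofs are below) =====
def Claim_equal_find_harmless_ingredients : Prop := ∀ (data : List (List String × List String)), Dom_find_harmless_ingredients data → Spec_find_harmless_ingredients data (find_harmless_ingredients data)

-- ===== LEMMAS AND PROOFS =====

-- "a is a known allergen of d and i is among its candidate ingredients"
def fhiM (d : PySem.Dict String (List String)) (a i : String) : Prop :=
  ∃ l, d.get? a = some l ∧ i ∈ l

-- the semantic condition both programs compute: some allergen a occurs in a food,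
-- and i occurs in every food listing a
def fhiCond (data : List (List String × List String)) (i : String) : Prop :=
  ∃ a, (∃ f ∈ data, a ∈ f.2) ∧ ∀ f ∈ data, a ∈ f.2 → i ∈ f.1

-- ---- A side ----

theorem gaInner_get?_isSome (ing : List String) (as : List String)
    (d : PySem.Dict String (List String)) (a : String) :
    ((as.foldl (fun d a =>
      match d.get? a with
      | none => d.insert a ing
      | some prev => d.insert a (PySem.Set.inter (PySem.Set.ofList prev) ing)) d).get? a).isSome = true
      ↔ (d.get? a).isSome = true ∨ a ∈ as := by
  induction as generalizing d with
  | nil => simp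
  | cons a0 rest ih =>
    simp only [List.foldl_cons, ih, List.mem_cons]
    by_cases h : a = a0
    · subst h
      cases hg : d.get? a <;> simp [PySem.Dict.get?_insert_self]
    · cases hg : d.get? a0 <;>
        simp [PySem.Dict.get?_insert_of_ne _ _ h] <;> tauto

theorem gaInner_M (ing : List String) (as : List String)
    (d : PySem.Dict String (List String)) (a i : String) :
    fhiM (as.foldl (fun d a =>
      match d.get? a with
      | none => d.insert a ing
      | some prev => d.insert a (PySem.Set.inter (PySem.Set.ofList prev) ing)) d) a i
      ↔ (a ∈ as → i ∈ ing) ∧ (fhiM d a i ∨ (¬ (d.get? a).isSome = true ∧ a ∈ as)) := by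
  induction as generalizing d with
  | nil => simp [fhiM]
  | cons a0 rest ih =>
    rw [List.foldl_cons, ih]
    by_cases h : a = a0
    · subst h
      cases hg : d.get? a with
      | none =>
        simp [fhiM, PySem.Dict.get?_insert_self, hg]
        tauto
      | some prev =>
        simp [fhiM, PySem.Dict.get?_insert_self, hg, PySem.Set.mem_inter, PySem.Set.mem_ofList]
        tauto
    · have h1 : (match d.get? a0 with
          | none => d.insert a0 ing
          | some prev => d.insert a0 (PySem.Set.inter (PySem.Set.ofList prev) ing)).get? a = d.get? a := by
        cases hg : d.get? a0 <;> simp [PySem.Dict.get?_insert_of_ne _ _ h]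
      simp only [fhiM, h1, List.mem_cons]
      constructor
      · rintro ⟨hmem, hM⟩
        refine ⟨fun hm => hmem (hm.resolve_left h), ?_⟩
        rcases hM with hM | ⟨hns, hr⟩
        · exact Or.inl hM
        · exact Or.inr ⟨hns, Or.inr hr⟩
      · rintro ⟨hmem, hM⟩
        refine ⟨fun hm => hmem (Or.inr hm), ?_⟩
        rcases hM with hM | ⟨hns, (hr | hr)⟩
        · exact Or.inl hM
        · exact absurd hr h
        · exact Or.inr ⟨hns, hr⟩

theorem gaOuter_M (fs : List (List String × List String))
    (d : PySem.Dict String (List String)) (a i : String) :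
    fhiM (fs.foldl (fun d food =>
      food.2.foldl (fun d a =>
        match d.get? a with
        | none => d.insert a food.1
        | some prev => d.insert a (PySem.Set.inter (PySem.Set.ofList prev) food.1)) d) d) a i
      ↔ (∀ f ∈ fs, a ∈ f.2 → i ∈ f.1) ∧
        (fhiM d a i ∨ (¬ (d.get? a).isSome = true ∧ ∃ f ∈ fs, a ∈ f.2)) := by
  induction fs generalizing d with
  | nil => simp
  | cons f rest ih =>
    simp only [List.foldl_cons, ih, gaInner_M, gaInner_get?_isSome, List.mem_cons]
    constructor
    · rintro ⟨hall, hM⟩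
      rcases hM with ⟨hmem, hM⟩ | ⟨hns, hmm⟩
      · refine ⟨?_, ?_⟩
        · rintro g (rfl | hg)
          · exact fun ha => hmem ha
          · exact hall g hg
        · rcases hM with hM | ⟨hns, hin⟩
          · exact Or.inl hM
          · exact Or.inr ⟨hns, ⟨f, Or.inl rfl, hin⟩⟩
      · rcases not_or.mp hns with ⟨hns1, hns2⟩
        refine ⟨?_, Or.inr ⟨hns1, ?_⟩⟩
        · rintro g (rfl | hg)
          · exact fun ha => absurd ha hns2
          · exact hall g hg
        · rcases hmm with ⟨g, hg, hag⟩; exact ⟨g, Or.inr hg, hag⟩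
    · rintro ⟨hall, hM⟩
      refine ⟨fun g hg => hall g (Or.inr hg), ?_⟩
      rcases hM with hM | ⟨hns, ⟨g, (rfl | hg), hag⟩⟩
      · exact Or.inl ⟨fun ha => hall f (Or.inl rfl) ha, Or.inl hM⟩
      · exact Or.inl ⟨fun ha => hall g (Or.inl rfl) ha, Or.inr ⟨hns, hag⟩⟩
      · by_cases haf : a ∈ f.2
        · exact Or.inl ⟨fun _ => hall f (Or.inl rfl) haf, Or.inr ⟨hns, haf⟩⟩
        · exact Or.inr ⟨by simpa [haf] using hns, ⟨g, hg, hag⟩⟩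

theorem ga_M_iff (data : List (List String × List String)) (a i : String) :
    fhiM (get_alergens data) a i
      ↔ (∃ f ∈ data, a ∈ f.2) ∧ ∀ f ∈ data, a ∈ f.2 → i ∈ f.1 := by
  rw [get_alergens, gaOuter_M]
  simp [fhiM, PySem.Dict.get?_empty]
  tauto

theorem mem_alergen_list (data : List (List String × List String)) (i : String) :
    i ∈ ((get_alergens data).keys.map (fun a => (get_alergens data).getD a [])).foldl (· ++ ·) []
      ↔ fhiCond data i := by
  have hflat : ∀ (ls : List (List String)) (acc : List String),
      ls.foldl (· ++ ·) acc = acc ++ ls.flatten := by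
    intro ls
    induction ls with
    | nil => simp
    | cons l rest ih => intro acc; simp [ih, List.append_assoc]
  rw [hflat, List.nil_append]
  simp only [List.mem_flatten, List.mem_map]
  constructor
  · rintro ⟨l, ⟨a, hak, rfl⟩, hi⟩
    have hc : ((get_alergens data).get? a).isSome = true := by
      rw [← PySem.Dict.contains_eq_isSome_get?]
      exact (PySem.Dict.contains_iff_mem_keys _ _).mpr hak
    rcases Option.isSome_iff_exists.mp hc with ⟨l', hl'⟩
    rw [PySem.Dict.getD_of_get?_eq_some _ _ hl'] at hi
    have : fhiM (get_alergens data) a i := ⟨l', hl', hi⟩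
    rw [ga_M_iff] at this
    exact ⟨a, this.1, this.2⟩
  · rintro ⟨a, hex, hall⟩
    have : fhiM (get_alergens data) a i := (ga_M_iff data a i).mpr ⟨hex, hall⟩
    rcases this with ⟨l, hl, hi⟩
    refine ⟨l, ⟨a, ?_, PySem.Dict.getD_of_get?_eq_some _ _ hl⟩, hi⟩
    rw [← PySem.Dict.contains_iff_mem_keys, PySem.Dict.contains_eq_isSome_get?, hl]
    rfl

-- ---- B side ----

-- the two count dicts record exactly the (co-)occurrence counts
theorem fhiCounts_fst_getD (data : List (List String × List String)) (a : String) :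
    (fhiCounts data).1.getD a 0 = (data.countP (fun f => f.2.contains a) : Int) := by
  rw [fhiCounts]
  suffices h : ∀ (st : PySem.Dict String Int × PySem.Dict (String × String) Int),
      (data.foldl (fun st food =>
        (PySem.Set.ofList food.2).foldl (fun st a =>
          (st.1.modify a 0 (· + 1),
           (PySem.Set.ofList food.1).foldl (fun co i => co.modify (a, i) 0 (· + 1)) st.2)) st) st).1.getD a 0
        = st.1.getD a 0 + (data.countP (fun f => f.2.contains a) : Int) by
    rw [h]; simp [PySem.Dict.getD_empty]
  induction data with
  | nil => intro st; simp
  | cons f rest ih =>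
    intro st
    rw [List.foldl_cons, ih, List.countP_cons]
    have hfst : ∀ (as : List String) (st : PySem.Dict String Int × PySem.Dict (String × String) Int),
        (as.foldl (fun st a =>
          (st.1.modify a 0 (· + 1),
           (PySem.Set.ofList f.1).foldl (fun co i => co.modify (a, i) 0 (· + 1)) st.2)) st).1
          = as.foldl (fun d x => d.modify x 0 (· + 1)) st.1 := by
      intro as
      induction as with
      | nil => intro st; rfl
      | cons a0 r ih2 => intro st; rw [List.foldl_cons, List.foldl_cons, ih2]
    rw [hfst, PySem.Dict.getD_foldl_modify_add_one]
    have hc : (PySem.Set.ofList f.2).count a = if f.2.contains a then 1 else 0 := by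
      by_cases hm : a ∈ f.2
      · rw [List.count_eq_one_of_mem (PySem.Set.nodup_ofList _) ((PySem.Set.mem_ofList _ _).mpr hm)]
        simp [hm]
      · rw [List.count_eq_zero_of_not_mem (fun hx => hm ((PySem.Set.mem_ofList _ _).mp hx))]
        simp [hm]
    rw [hc]
    split_ifs <;> push_cast <;> ring

theorem fhiCounts_snd_getD (data : List (List String × List String)) (a i : String) :
    (fhiCounts data).2.getD (a, i) 0
      = (data.countP (fun f => f.2.contains a && f.1.contains i) : Int) := by
  rw [fhiCounts]
  suffices h : ∀ (st : PySem.Dict String Int × PySem.Dict (String × String) Int),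
      (data.foldl (fun st food =>
        (PySem.Set.ofList food.2).foldl (fun st a =>
          (st.1.modify a 0 (· + 1),
           (PySem.Set.ofList food.1).foldl (fun co i => co.modify (a, i) 0 (· + 1)) st.2)) st) st).2.getD (a, i) 0
        = st.2.getD (a, i) 0 + (data.countP (fun f => f.2.contains a && f.1.contains i) : Int) by
    rw [h]; simp [PySem.Dict.getD_empty]
  induction data with
  | nil => intro st; simp
  | cons f rest ih =>
    intro st
    rw [List.foldl_cons, ih, List.countP_cons]
    -- the second component of the inner fold is a fold of keyed modifies
    have hsnd : ∀ (as : List String) (st : PySem.Dict String Int × PySem.Dict (String × String) Int),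
        (as.foldl (fun st a =>
          (st.1.modify a 0 (· + 1),
           (PySem.Set.ofList f.1).foldl (fun co i => co.modify (a, i) 0 (· + 1)) st.2)) st).2
          = as.foldl (fun co a =>
              (PySem.Set.ofList f.1).foldl (fun co i => co.modify (a, i) 0 (· + 1)) co) st.2 := by
      intro as
      induction as with
      | nil => intro st; rfl
      | cons a0 r ih2 => intro st; rw [List.foldl_cons, List.foldl_cons, ih2]
    rw [hsnd]
    have hone : ∀ (a0 : String) (co : PySem.Dict (String × String) Int),
        ((PySem.Set.ofList f.1).foldl (fun co i => co.modify (a0, i) 0 (· + 1)) co).getD (a, i) 0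
          = co.getD (a, i) 0 + ((if a = a0 ∧ i ∈ f.1 then 1 else 0) : Int) := by
      intro a0 co
      have hmap : (PySem.Set.ofList f.1).foldl (fun co i => co.modify (a0, i) 0 (· + 1)) co
          = ((PySem.Set.ofList f.1).map (fun i => (a0, i))).foldl (fun co p => co.modify p 0 (· + 1)) co := by
        rw [List.foldl_map]
      rw [hmap, PySem.Dict.getD_foldl_modify_add_one]
      congr 1
      by_cases ha : a = a0
      · subst ha
        rw [List.count_map_of_injective _ _ (fun x y h => by injection h)]
        by_cases hi : i ∈ f.1
        · rw [List.count_eq_one_of_mem (PySem.Set.nodup_ofList _) ((PySem.Set.mem_ofList _ _).mpr hi)]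
          simp [hi]
        · rw [List.count_eq_zero_of_not_mem (fun hx => hi ((PySem.Set.mem_ofList _ _).mp hx))]
          simp [hi]
      · rw [List.count_eq_zero_of_not_mem]
        · simp [ha]
        · intro hx
          rcases List.mem_map.mp hx with ⟨j, _, hj⟩
          exact ha (by injection hj with h1 h2; exact h1.symm)
    have hkey : ∀ (as : List String), as.Nodup → ∀ (co : PySem.Dict (String × String) Int),
        (as.foldl (fun co a =>
          (PySem.Set.ofList f.1).foldl (fun co i => co.modify (a, i) 0 (· + 1)) co) co).getD (a, i) 0
          = co.getD (a, i) 0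
            + ((if a ∈ as ∧ i ∈ f.1 then 1 else 0) : Int) := by
      intro as
      induction as with
      | nil => intro _ co; simp
      | cons a0 r ih2 =>
        intro hnd co
        rcases List.nodup_cons.mp hnd with ⟨ha0r, hndr⟩
        rw [List.foldl_cons, ih2 hndr, hone a0 co]
        by_cases h1 : a = a0 ∧ i ∈ f.1 <;> by_cases h2 : a ∈ r ∧ i ∈ f.1
        · rcases h1 with ⟨rfl, _⟩; exact absurd h2.1 ha0r
        · have hc : a ∈ a0 :: r ∧ i ∈ f.1 := ⟨List.mem_cons.mpr (Or.inl h1.1), h1.2⟩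
          rw [if_pos h1, if_neg h2, if_pos hc]; ring
        · have hc : a ∈ a0 :: r ∧ i ∈ f.1 := ⟨List.mem_cons.mpr (Or.inr h2.1), h2.2⟩
          rw [if_neg h1, if_pos h2, if_pos hc]; ring
        · have hc : ¬ (a ∈ a0 :: r ∧ i ∈ f.1) := by
            rintro ⟨hm, hi⟩
            rcases List.mem_cons.mp hm with rfl | hm
            · exact h1 ⟨rfl, hi⟩
            · exact h2 ⟨hm, hi⟩
          rw [if_neg h1, if_neg h2, if_neg hc]; ring
    rw [hkey _ (PySem.Set.nodup_ofList _)]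
    have hb : (f.2.contains a && f.1.contains i) = decide (a ∈ PySem.Set.ofList f.2 ∧ i ∈ f.1) := by
      by_cases h1 : a ∈ f.2 <;> by_cases h2 : i ∈ f.1 <;>
        simp [h1, h2, PySem.Set.mem_ofList]
    rw [hb]
    by_cases hm : a ∈ PySem.Set.ofList f.2 ∧ i ∈ f.1
    · rw [if_pos hm, if_pos (by simpa using hm)]; push_cast; ring
    · rw [if_neg hm, if_neg (by simpa using hm)]; push_cast; ring

-- keys of the cooccur dict stay Nodup through the nested modify loops
theorem fhiCounts_snd_keys_nodup (data : List (List String × List String)) :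
    (fhiCounts data).2.keys.Nodup := by
  rw [fhiCounts]
  suffices h : ∀ (st : PySem.Dict String Int × PySem.Dict (String × String) Int),
      st.2.keys.Nodup →
      (data.foldl (fun st food =>
        (PySem.Set.ofList food.2).foldl (fun st a =>
          (st.1.modify a 0 (· + 1),
           (PySem.Set.ofList food.1).foldl (fun co i => co.modify (a, i) 0 (· + 1)) st.2)) st) st).2.keys.Nodup by
    exact h _ (by simp [PySem.Dict.keys_empty])
  induction data with
  | nil => intro st h; exact h
  | cons f rest ih =>
    intro st h
    rw [List.foldl_cons]
    apply ih
    have hfood : ∀ (as : List String) (st : PySem.Dict String Int × PySem.Dict (String × String) Int),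
        st.2.keys.Nodup →
        ((as.foldl (fun st a =>
          (st.1.modify a 0 (· + 1),
           (PySem.Set.ofList f.1).foldl (fun co i => co.modify (a, i) 0 (· + 1)) st.2)) st)).2.keys.Nodup := by
      intro as
      induction as with
      | nil => intro st h; exact h
      | cons a0 r ih2 =>
        intro st h
        rw [List.foldl_cons]
        apply ih2
        have hing : ∀ (js : List String) (co : PySem.Dict (String × String) Int),
            co.keys.Nodup →
            (js.foldl (fun co i => co.modify (a0, i) 0 (· + 1)) co).keys.Nodup := by
          intro js
          induction js with
          | nil => intro co h; exact h
          | cons i0 r2 ih3 =>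
            intro co h
            rw [List.foldl_cons]
            apply ih3
            rw [PySem.Dict.keys_modify]
            by_cases hc : co.contains (a0, i0) = true
            · rw [PySem.Dict.keys_insert_of_contains _ _ hc]; exact h
            · rw [PySem.Dict.keys_insert_of_not_contains _ _ (by simpa using hc)]
              refine List.Nodup.append h (by simp) ?_
              intro x hx hx2
              simp only [List.mem_singleton] at hx2
              subst hx2
              exact absurd ((PySem.Dict.contains_iff_mem_keys _ _).mpr hx) (by simpa using hc)
        exact hing _ _ h
    exact hfood _ _ h

-- which pairs appear as keys of the cooccur dict
theorem fhiCounts_snd_mem_keys (data : List (List String × List String)) (a i : String) :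
    (a, i) ∈ (fhiCounts data).2.keys ↔ ∃ f ∈ data, a ∈ f.2 ∧ i ∈ f.1 := by
  rw [fhiCounts]
  suffices h : ∀ (st : PySem.Dict String Int × PySem.Dict (String × String) Int),
      ((a, i) ∈ (data.foldl (fun st food =>
        (PySem.Set.ofList food.2).foldl (fun st a =>
          (st.1.modify a 0 (· + 1),
           (PySem.Set.ofList food.1).foldl (fun co i => co.modify (a, i) 0 (· + 1)) st.2)) st) st).2.keys
        ↔ (a, i) ∈ st.2.keys ∨ ∃ f ∈ data, a ∈ f.2 ∧ i ∈ f.1) by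
    rw [h]; simp [PySem.Dict.keys_empty]
  induction data with
  | nil => intro st; simp
  | cons f rest ih =>
    intro st
    rw [List.foldl_cons, ih]
    have hsnd : ∀ (as : List String) (st : PySem.Dict String Int × PySem.Dict (String × String) Int),
        (as.foldl (fun st a =>
          (st.1.modify a 0 (· + 1),
           (PySem.Set.ofList f.1).foldl (fun co i => co.modify (a, i) 0 (· + 1)) st.2)) st).2
          = as.foldl (fun co a =>
              (PySem.Set.ofList f.1).foldl (fun co i => co.modify (a, i) 0 (· + 1)) co) st.2 := by
      intro as
      induction as with
      | nil => intro st; rfl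
      | cons a0 r ih2 => intro st; rw [List.foldl_cons, List.foldl_cons, ih2]
    rw [hsnd]
    have hkeys : ∀ (as : List String) (co : PySem.Dict (String × String) Int),
        ((a, i) ∈ (as.foldl (fun co a =>
          (PySem.Set.ofList f.1).foldl (fun co i => co.modify (a, i) 0 (· + 1)) co) co).keys
          ↔ (a, i) ∈ co.keys ∨ (a ∈ as ∧ i ∈ f.1)) := by
      intro as
      induction as with
      | nil => intro co; simp
      | cons a0 r ih2 =>
        intro co
        rw [List.foldl_cons, ih2]
        have hone : ∀ (co : PySem.Dict (String × String) Int),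
            ((a, i) ∈ ((PySem.Set.ofList f.1).foldl (fun co j => co.modify (a0, j) 0 (· + 1)) co).keys
              ↔ (a, i) ∈ co.keys ∨ (a = a0 ∧ i ∈ f.1)) := by
          intro co
          rw [PySem.Dict.keys_foldl_modify_key]
          rw [PySem.Set.mem_update]
          constructor
          · rintro (h | h)
            · exact Or.inl h
            · rcases List.mem_map.mp h with ⟨j, hj, hje⟩
              injection hje with h1 h2
              exact Or.inr ⟨h1.symm, h2 ▸ (PySem.Set.mem_ofList _ _).mp hj⟩
          · rintro (h | ⟨rfl, hi⟩)
            · exact Or.inl h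
            · exact Or.inr (List.mem_map.mpr ⟨i, (PySem.Set.mem_ofList _ _).mpr hi, rfl⟩)
        rw [hone]
        simp only [List.mem_cons]
        tauto
    rw [hkeys]
    simp only [PySem.Set.mem_ofList, List.mem_cons]
    constructor
    · rintro ((h | ⟨haf, hi⟩) | ⟨g, hg, hag, hig⟩)
      · exact Or.inl h
      · exact Or.inr ⟨f, Or.inl rfl, haf, hi⟩
      · exact Or.inr ⟨g, Or.inr hg, hag, hig⟩
    · rintro (h | ⟨g, (rfl | hg), hag, hig⟩)
      · exact Or.inl (Or.inl h)
      · exact Or.inl (Or.inr ⟨hag, hig⟩)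
      · exact Or.inr ⟨g, hg, hag, hig⟩

-- counting: countP of a conjunction equals countP of the outer condition iff the implication holds
theorem countP_and_eq_iff (l : List (List String × List String)) (p q : (List String × List String) → Bool) :
    (l.countP (fun f => p f && q f) = l.countP p) ↔ ∀ f ∈ l, p f = true → q f = true := by
  induction l with
  | nil => simp
  | cons f rest ih =>
    have hle : rest.countP (fun f => p f && q f) ≤ rest.countP p :=
      List.countP_mono_left (fun x _ h => by
        simp only [Bool.and_eq_true] at h; exact h.1)
    rw [List.countP_cons, List.countP_cons]
    by_cases hp : p f = true
    · by_cases hq : q f = true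
      · have hand : (p f && q f) = true := by simp [hp, hq]
        rw [if_pos hand, if_pos hp]
        constructor
        · intro h x hx hpx
          rcases List.mem_cons.mp hx with rfl | hx
          · exact hq
          · exact (ih.mp (by omega)) x hx hpx
        · intro h
          have := ih.mpr (fun x hx hpx => h x (List.mem_cons_of_mem _ hx) hpx)
          omega
      · have hand : ¬ ((p f && q f) = true) := by simp [hq]
        rw [if_neg hand, if_pos hp]
        constructor
        · intro h; exact absurd h (by omega)
        · intro h; exact absurd (h f (List.mem_cons.mpr (Or.inl rfl)) hp) hq
    · have hand : ¬ ((p f && q f) = true) := by simp [hp]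
      rw [if_neg hand, if_neg hp]
      simp only [Nat.add_zero]
      rw [ih]
      constructor
      · intro h x hx hpx
        rcases List.mem_cons.mp hx with rfl | hx
        · exact absurd hpx hp
        · exact h x hx hpx
      · intro h x hx hpx; exact h x (List.mem_cons_of_mem _ hx) hpx

-- membership in the set built by B's filtering loop over cooccur.items
theorem mem_foldl_add_if {α β : Type} [BEq β] [LawfulBEq β] (l : List α) (P : α → Bool) (g : α → β)
    (s : PySem.Set β) (y : β) :
    y ∈ l.foldl (fun s p => if P p then PySem.Set.add s (g p) else s) s
      ↔ y ∈ s ∨ ∃ p ∈ l, P p = true ∧ y = g p := by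
  induction l generalizing s with
  | nil => simp
  | cons x rest ih =>
    rw [List.foldl_cons]
    by_cases hP : P x = true
    · rw [if_pos hP, ih]
      simp [hP, PySem.Set.mem_add, List.mem_cons]
      tauto
    · rw [if_neg hP, ih]
      simp only [List.mem_cons]
      constructor
      · rintro (h | ⟨p, hp, hPp, rfl⟩)
        · exact Or.inl h
        · exact Or.inr ⟨p, Or.inr hp, hPp, rfl⟩
      · rintro (h | ⟨p, (rfl | hp), hPp, rfl⟩)
        · exact Or.inl h
        · exact absurd hPp hP
        · exact Or.inr ⟨p, hp, hPp, rfl⟩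

theorem mem_candidates (data : List (List String × List String)) (i : String) :
    i ∈ (fhiCounts data).2.items.foldl (fun s p =>
      if p.2 == (fhiCounts data).1.getD p.1.1 0 then PySem.Set.add s p.1.2 else s) PySem.Set.empty
      ↔ fhiCond data i := by
  rw [mem_foldl_add_if]
  constructor
  · rintro (h | ⟨p, hp, hPc, rfl⟩)
    · exact absurd h List.not_mem_nil
    obtain ⟨⟨a, j⟩, c⟩ := p
    have hget : (fhiCounts data).2.get? (a, j) = some c :=
      PySem.Dict.get?_of_mem_items _ hp (fhiCounts_snd_keys_nodup data)
    have hgd : (fhiCounts data).2.getD (a, j) 0 = c :=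
      PySem.Dict.getD_of_get?_eq_some _ _ hget
    rw [fhiCounts_snd_getD] at hgd
    have hPc' : c = (fhiCounts data).1.getD a 0 := by simpa using hPc
    rw [fhiCounts_fst_getD] at hPc'
    have hcnt : data.countP (fun f => f.2.contains a && f.1.contains j)
        = data.countP (fun f => f.2.contains a) := by
      have := hgd.trans hPc'
      exact_mod_cast this
    have hall := (countP_and_eq_iff data _ _).mp hcnt
    have hkey : (a, j) ∈ (fhiCounts data).2.keys :=
      PySem.Dict.mem_keys_of_mem_items _ hp
    rcases (fhiCounts_snd_mem_keys data a j).mp hkey with ⟨f, hf, haf, _⟩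
    refine ⟨a, ⟨f, hf, haf⟩, ?_⟩
    intro g hg hag
    have := hall g hg (by simpa using hag)
    simpa using this
  · rintro ⟨a, ⟨f, hf, haf⟩, hall⟩
    have hcnt : data.countP (fun f => f.2.contains a && f.1.contains i)
        = data.countP (fun f => f.2.contains a) :=
      (countP_and_eq_iff data _ _).mpr (fun g hg hag => by simp [hall g hg (by simpa using hag)])
    have hkey : (a, i) ∈ (fhiCounts data).2.keys :=
      (fhiCounts_snd_mem_keys data a i).mpr ⟨f, hf, haf, hall f hf haf⟩
    have hsome : ((fhiCounts data).2.get? (a, i)).isSome = true := by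
      rw [← PySem.Dict.contains_eq_isSome_get?]
      exact (PySem.Dict.contains_iff_mem_keys _ _).mpr hkey
    rcases Option.isSome_iff_exists.mp hsome with ⟨c, hc⟩
    refine Or.inr ⟨((a, i), c), PySem.Dict.mem_items_of_get?_eq_some _ hc, ?_, rfl⟩
    have hv : (fhiCounts data).2.getD (a, i) 0 = c := PySem.Dict.getD_of_get?_eq_some _ _ hc
    rw [fhiCounts_snd_getD] at hv
    rw [fhiCounts_fst_getD]
    simp only [beq_iff_eq]
    rw [← hv, hcnt]

-- ===== VERDICT (by name: the statement is the Claim_ definition above) =====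
theorem find_harmless_ingredients_spec : Claim_equal_find_harmless_ingredients := by
  intro data _
  unfold Spec_find_harmless_ingredients
  simp only [find_harmless_ingredients, find_harmless_ingredients_alt]
  have hinner : ∀ (L : List String) (food : List String × List String) (h : List String),
      food.1.foldl (fun h i => if !(L.contains i) then h ++ [i] else h) h
        = h ++ food.1.filter (fun i => !(L.contains i)) := by
    intro L food h
    have := PySem.List.foldl_append_if (fun i => !(L.contains i)) (fun i => i) food.1 h
    simpa using this
  have houter : ∀ (L : List String),
      data.foldl (fun h food =>
        food.1.foldl (fun h i => if !(L.contains i) then h ++ [i] else h) h) []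
        = data.flatMap (fun food => food.1.filter (fun i => !(L.contains i))) := by
    intro L
    have hfun : (fun (h : List String) (food : List String × List String) =>
        food.1.foldl (fun h i => if !(L.contains i) then h ++ [i] else h) h)
        = fun h food => h ++ food.1.filter (fun i => !(L.contains i)) :=
      funext fun h => funext fun food => hinner L food h
    rw [hfun]
    exact PySem.List.foldl_append_eq_flatMap _ data []
  rw [houter]
  have hpt : ∀ j : String,
      (((get_alergens data).keys.map (fun a => (get_alergens data).getD a [])).foldl (· ++ ·) []).contains j
        = ((fhiCounts data).2.items.foldl (fun s p =>
            if p.2 == (fhiCounts data).1.getD p.1.1 0 then PySem.Set.add s p.1.2 else s)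
            PySem.Set.empty).contains j := by
    intro j
    rw [Bool.eq_iff_iff]
    simp only [List.contains_iff_mem, PySem.Set.contains_iff]
    exact (mem_alergen_list data j).trans (mem_candidates data j).symm
  congr 1
  funext food
  apply List.filter_congr
  intro j _
  rw [hpt j]
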